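-- pv_equiv track=rewrite | github.com/lluiseriksson/THE-ERIKSSON-PROGRAMME | scripts/f3_residual_selector_counterexample_search.py | anchored_buckets
-- ===== SOURCE A (Python) =====
-- from itertools import combinations, product
-- from math import dist
--
-- Vertex = tuple[tuple[int, ...], tuple[int, int]]
--
-- Bucket = frozenset[Vertex]
--
-- def adjacent(a: Vertex, b: Vertex) -> bool:
--     return a != b and dist(a[0], b[0]) <= 1.0
--
-- def connected(bucket: Bucket) -> bool:
--     if not bucket:
--         return False
--     seen = {next(iter(bucket))}
--     stack = list(seen)
--     while stack:
--         x = stack.pop()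
--         for y in bucket:
--             if y not in seen and adjacent(x, y):
--                 seen.add(y)
--                 stack.append(y)
--     return len(seen) == len(bucket)
--
-- def anchored_buckets(vs: list[Vertex], root: Vertex, k: int) -> list[Bucket]:
--     out: list[Bucket] = []
--     rest = [v for v in vs if v != root]
--     for combo in combinations(rest, k - 1):
--         bucket = frozenset((root, *combo))
--         if connected(bucket):
--             out.append(bucket)
--     return out
-- ===== SOURCE B (Python) =====
-- from itertools import combinations
-- from math import dist
--
--
-- def adjacent(a, b):
--     return a != b and dist(a[0], b[0]) <= 1.0
--
--
-- def _connected(bucket):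
--     # fixpoint closure: repeatedly absorb every vertex adjacent to the
--     # component grown from an arbitrary first vertex (no explicit stack)
--     verts = list(bucket)
--     if not verts:
--         return False
--     comp = {verts[0]}
--     for _ in range(len(verts) - 1):
--         fresh = [y for y in verts
--                  if y not in comp and any(adjacent(x, y) for x in comp)]
--         comp.update(fresh)
--     return len(comp) == len(verts)
--
--
-- def anchored_buckets(vs, root, k):
--     out = []
--     rest = [v for v in vs if v != root]
--     for combo in combinations(rest, k - 1):
--         bucket = frozenset((root, *combo))
--         if _connected(bucket):
--             out.append(bucket)
--     return out
-- ===== Notes on version B (the rewrite author's own statement) =====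
-- stated objective: alternative
-- what changed: The inner connectivity test is rewritten from an explicit-stack DFS into a fixpoint closure iteration (repeatedly absorbing all vertices adjacent to the growing component, no stack), while the anchored enumeration over combinations is kept so the output order is unchanged.
import Mathlib
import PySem

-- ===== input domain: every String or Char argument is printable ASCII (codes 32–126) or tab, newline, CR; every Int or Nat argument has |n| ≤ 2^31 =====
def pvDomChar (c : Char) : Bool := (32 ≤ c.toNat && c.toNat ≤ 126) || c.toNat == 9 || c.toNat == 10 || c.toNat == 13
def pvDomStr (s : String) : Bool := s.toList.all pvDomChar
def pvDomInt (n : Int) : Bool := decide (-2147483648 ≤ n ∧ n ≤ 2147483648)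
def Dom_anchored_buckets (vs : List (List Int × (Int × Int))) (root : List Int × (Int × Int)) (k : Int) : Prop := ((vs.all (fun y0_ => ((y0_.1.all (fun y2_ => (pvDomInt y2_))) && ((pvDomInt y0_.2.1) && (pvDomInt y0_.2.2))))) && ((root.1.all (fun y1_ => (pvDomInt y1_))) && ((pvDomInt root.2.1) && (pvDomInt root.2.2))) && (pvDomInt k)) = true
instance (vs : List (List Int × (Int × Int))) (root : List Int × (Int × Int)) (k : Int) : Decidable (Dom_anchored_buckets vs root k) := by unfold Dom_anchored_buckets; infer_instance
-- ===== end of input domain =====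

-- B replaces A's explicit-stack DFS connectivity test by a fixpoint closure iteration;
-- the anchored enumeration over combinations (and hence the output order) is unchanged.
-- Here frozensets (buckets) are PySem sets: lists of distinct elements compared as sets.

-- ===== PORT A =====

-- math.dist(a[0], b[0]) <= 1.0 is modelled by "sum of squared coordinate differences ≤ 1":
-- exact for equal-length tuples (guaranteed by Pre_ at every call site) of ints with
-- |n| ≤ 2^31 (Dom), where double arithmetic cannot cross the 1.0 boundary.
def pvSq (xs ys : List Int) : Int :=
  ((xs.zip ys).map (fun p => (p.1 - p.2) * (p.1 - p.2))).sum

def pvAdj (a b : List Int × Int × Int) : Bool :=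
  decide (a ≠ b) && decide (pvSq a.1 b.1 ≤ 1)

-- itertools.combinations(xs, r): all r-subsequences, in itertools' order
def pvCombos {α : Type} : List α → Nat → List (List α)
  | _, 0 => [[]]
  | [], _ + 1 => []
  | x :: xs, r + 1 => (pvCombos xs r).map (x :: ·) ++ pvCombos xs (r + 1)

-- A's while-loop: pop x from the stack, scan the bucket, add unseen neighbours of x to
-- seen and push them; the fuel bucket.length bounds the number of pops (each push is a
-- fresh vertex of the bucket), so the port returns exactly the Python loop's final seen.
def pvDfsLoop (bucket : List (List Int × Int × Int)) :
    Nat → List (List Int × Int × Int) → List (List Int × Int × Int) →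
    List (List Int × Int × Int)
  | 0, seen, _ => seen
  | _ + 1, seen, [] => seen
  | fuel + 1, seen, x :: rest =>
    let p := bucket.foldl
      (fun acc y => if y ∉ acc.1 ∧ pvAdj x y then (acc.1 ++ [y], y :: acc.2) else acc)
      (seen, rest)
    pvDfsLoop bucket fuel p.1 p.2

def pvConnected (bucket : List (List Int × Int × Int)) : Bool :=
  match bucket with
  | [] => false
  | v :: _ => (pvDfsLoop bucket bucket.length [v] [v]).length == bucket.length

def anchored_buckets (vs : List (List Int × (Int × Int))) (root : List Int × (Int × Int)) (k : Int) : List (List (List Int × (Int × Int))) :=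
  let rest := vs.filter (fun v => v ≠ root)
  (pvCombos rest (k - 1).toNat).foldl
    (fun out combo =>
      let bucket := PySem.Set.ofList (root :: combo)
      if pvConnected bucket then out ++ [bucket] else out) []

-- ===== PORT B =====

-- one closure round: absorb every vertex adjacent to the current component
def pvStep (verts comp : List (List Int × Int × Int)) : List (List Int × Int × Int) :=
  PySem.Set.update comp
    (verts.filter (fun y => decide (y ∉ comp) && comp.any (fun x => pvAdj x y)))

def pvIter (verts : List (List Int × Int × Int)) :
    Nat → List (List Int × Int × Int) → List (List Int × Int × Int)
  | 0, comp => comp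
  | n + 1, comp => pvIter verts n (pvStep verts comp)

def pvConnectedAlt (verts : List (List Int × Int × Int)) : Bool :=
  match verts with
  | [] => false
  | v :: _ => (pvIter verts (verts.length - 1) [v]).length == verts.length

def anchored_buckets_alt (vs : List (List Int × (Int × Int))) (root : List Int × (Int × Int)) (k : Int) : List (List (List Int × (Int × Int))) :=
  let rest := vs.filter (fun v => v ≠ root)
  (pvCombos rest (k - 1).toNat).foldl
    (fun out combo =>
      let bucket := PySem.Set.ofList (root :: combo)
      if pvConnectedAlt bucket then out ++ [bucket] else out) []

-- ===== PRECONDITION & SPEC =====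
-- Pre_ is exactly where Python A returns: k ≥ 1 (combinations(rest, k-1) raises
-- ValueError for negative k-1), and whenever some bucket of size ≥ 2 is formed
-- (k ≥ 2 and k-1 ≤ len(rest)), every non-root vertex has coordinates of root's
-- dimension — otherwise math.dist raises ValueError on mismatched tuple lengths.
def Pre_anchored_buckets (vs : List (List Int × (Int × Int))) (root : List Int × (Int × Int)) (k : Int) : Prop :=
  1 ≤ k ∧
  (2 ≤ k ∧ k - 1 ≤ ((vs.filter (fun v => v ≠ root)).length : Int) →
    ∀ v ∈ vs, v ≠ root → v.1.length = root.1.length)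
instance (vs : List (List Int × (Int × Int))) (root : List Int × (Int × Int)) (k : Int) : Decidable (Pre_anchored_buckets vs root k) := by unfold Pre_anchored_buckets; infer_instance

def pvWitness_anchored_buckets : (List (List Int × (Int × Int))) × (List Int × (Int × Int)) × Int :=
  ([([0], (0, 0)), ([1], (0, 0)), ([5], (1, 2))], ([0], (0, 0)), 2)

def Spec_anchored_buckets (vs : List (List Int × (Int × Int))) (root : List Int × (Int × Int)) (k : Int) (out : List (List (List Int × (Int × Int)))) : Prop := out = anchored_buckets_alt vs root k
instance (vs : List (List Int × (Int × Int))) (root : List Int × (Int × Int)) (k : Int) (out : List (List (List Int × (Int × Int)))) : Decidable (Spec_anchored_buckets vs root k out) := by unfold Spec_anchored_buckets; infer_instance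

-- ===== CLAIM (what is proved, stated in full; the proofs are below) =====
def Claim_equal_anchored_buckets : Prop := ∀ (vs : List (List Int × (Int × Int))) (root : List Int × (Int × Int)) (k : Int), Dom_anchored_buckets vs root k → Pre_anchored_buckets vs root k → Spec_anchored_buckets vs root k (anchored_buckets vs root k)

-- ===== LEMMAS AND PROOFS =====

-- S is closed under adjacency within the bucket
def pvClosed (bucket S : List (List Int × Int × Int)) : Prop :=
  ∀ x ∈ S, ∀ y ∈ bucket, pvAdj x y = true → y ∈ S

theorem pvFoldl_eq (x : List Int × Int × Int) (l : List (List Int × Int × Int))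
    (hl : l.Nodup) (s st : List (List Int × Int × Int)) :
    l.foldl (fun acc y => if y ∉ acc.1 ∧ pvAdj x y then (acc.1 ++ [y], y :: acc.2) else acc)
      (s, st)
    = (s ++ l.filter (fun y => decide (y ∉ s) && pvAdj x y),
       (l.filter (fun y => decide (y ∉ s) && pvAdj x y)).reverse ++ st) := by
  induction l generalizing s st with
  | nil => simp
  | cons y l ih =>
    have hy : y ∉ l := (List.nodup_cons.mp hl).1
    have hl' : l.Nodup := (List.nodup_cons.mp hl).2
    have hfilt : ∀ s' : List (List Int × Int × Int), (∀ z ∈ l, z ∈ s' ↔ z ∈ s) →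
        l.filter (fun z => decide (z ∉ s') && pvAdj x z)
          = l.filter (fun z => decide (z ∉ s) && pvAdj x z) := by
      intro s' hs'
      apply List.filter_congr
      intro z hz
      simp [hs' z hz]
    by_cases hc : y ∉ s ∧ pvAdj x y
    · simp only [List.foldl_cons, if_pos hc]
      rw [ih hl' (s ++ [y]) (y :: st)]
      rw [hfilt (s ++ [y]) (fun z hz => by
        have hzy : z ≠ y := fun h => hy (h ▸ hz)
        simp [List.mem_append, hzy])]
      have hcons : List.filter (fun z => decide (z ∉ s) && pvAdj x z) (y :: l)
          = y :: l.filter (fun z => decide (z ∉ s) && pvAdj x z) := by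
        rw [List.filter_cons_of_pos (by simp [hc.1, hc.2])]
      rw [hcons]
      simp
    · simp only [List.foldl_cons, if_neg hc]
      rw [ih hl' s st]
      have hcons : List.filter (fun z => decide (z ∉ s) && pvAdj x z) (y :: l)
          = l.filter (fun z => decide (z ∉ s) && pvAdj x z) := by
        rw [List.filter_cons_of_neg (by
          rcases Decidable.not_and_iff_not_or_not.mp hc with h | h
          · simp [Decidable.not_not.mp h]
          · simp [h])]
      rw [hcons]

theorem pvDfs_spec (bucket : List (List Int × Int × Int)) (hb : bucket.Nodup) :
    ∀ fuel seen stack, seen.Nodup → (∀ z ∈ stack, z ∈ seen) → (∀ z ∈ seen, z ∈ bucket) →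
    (∀ z ∈ seen, z ∉ stack → ∀ y ∈ bucket, pvAdj z y = true → y ∈ seen) →
    stack.length + (bucket.length - seen.length) ≤ fuel →
    (pvDfsLoop bucket fuel seen stack).Nodup ∧
    (∀ z ∈ pvDfsLoop bucket fuel seen stack, z ∈ bucket) ∧
    (∀ z ∈ seen, z ∈ pvDfsLoop bucket fuel seen stack) ∧
    pvClosed bucket (pvDfsLoop bucket fuel seen stack) ∧
    (∀ P : (List Int × Int × Int) → Prop, (∀ a ∈ seen, P a) →
      (∀ a y, P a → y ∈ bucket → pvAdj a y = true → P y) →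
      ∀ a ∈ pvDfsLoop bucket fuel seen stack, P a) := by
  intro fuel
  induction fuel with
  | zero =>
    intro seen stack h1 h2 h3 h4 hf
    have hstack : stack = [] := by
      cases stack with
      | nil => rfl
      | cons a s => simp at hf
    subst hstack
    refine ⟨h1, h3, fun z hz => hz, ?_, fun P hP _ a ha => hP a ha⟩
    intro x hx y hy hadj
    exact h4 x hx (by simp) y hy hadj
  | succ fuel ih =>
    intro seen stack h1 h2 h3 h4 hf
    cases stack with
    | nil =>
      refine ⟨h1, h3, fun z hz => hz, ?_, fun P hP _ a ha => hP a ha⟩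
      intro x hx y hy hadj
      exact h4 x hx (by simp) y hy hadj
    | cons x rest =>
      have hxseen : x ∈ seen := h2 x (by simp)
      set news := bucket.filter (fun y => decide (y ∉ seen) && pvAdj x y) with hnews
      have hunfold : pvDfsLoop bucket (fuel + 1) seen (x :: rest)
          = pvDfsLoop bucket fuel (seen ++ news) (news.reverse ++ rest) := by
        rw [hnews]
        simp only [pvDfsLoop]
        rw [pvFoldl_eq x bucket hb seen rest]
      have hnewsP : ∀ z ∈ news, z ∈ bucket ∧ z ∉ seen ∧ pvAdj x z = true := by
        intro z hz
        rw [hnews] at hz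
        have h := List.mem_filter.mp hz
        have h2' : z ∉ seen ∧ pvAdj x z = true := by simpa using h.2
        exact ⟨h.1, h2'.1, h2'.2⟩
      have hnewsnodup : news.Nodup := by rw [hnews]; exact hb.filter _
      have i1 : (seen ++ news).Nodup := by
        rw [List.nodup_append]
        exact ⟨h1, hnewsnodup, fun a ha b hbn hab => (hnewsP b hbn).2.1 (hab ▸ ha)⟩
      have i2 : ∀ z ∈ news.reverse ++ rest, z ∈ seen ++ news := by
        intro z hz
        rcases List.mem_append.mp hz with h | h
        · exact List.mem_append.mpr (Or.inr (List.mem_reverse.mp h))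
        · exact List.mem_append.mpr (Or.inl (h2 z (by simp [h])))
      have i3 : ∀ z ∈ seen ++ news, z ∈ bucket := by
        intro z hz
        rcases List.mem_append.mp hz with h | h
        · exact h3 z h
        · exact (hnewsP z h).1
      have i4 : ∀ z ∈ seen ++ news, z ∉ news.reverse ++ rest →
          ∀ y ∈ bucket, pvAdj z y = true → y ∈ seen ++ news := by
        intro z hz hns y hy hadj
        by_cases hzx : z = x
        · subst hzx
          by_cases hyseen : y ∈ seen
          · exact List.mem_append.mpr (Or.inl hyseen)
          · refine List.mem_append.mpr (Or.inr ?_)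
            rw [hnews]
            exact List.mem_filter.mpr ⟨hy, by simp [hyseen, hadj]⟩
        · rcases List.mem_append.mp hz with h | h
          · have hzrest : z ∉ rest := fun hr => hns (List.mem_append.mpr (Or.inr hr))
            have := h4 z h (by simp [hzx, hzrest])
            exact List.mem_append.mpr (Or.inl (this y hy hadj))
          · exact absurd (List.mem_append.mpr (Or.inl (List.mem_reverse.mpr h))) hns
      have hseenlen : (seen ++ news).length ≤ bucket.length :=
        (List.subperm_of_subset i1 (fun a ha => i3 a ha)).length_le
      have hseenlen0 : seen.length ≤ bucket.length :=
        (List.subperm_of_subset h1 (fun a ha => h3 a ha)).length_le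
      have i5 : (news.reverse ++ rest).length + (bucket.length - (seen ++ news).length) ≤ fuel := by
        simp only [List.length_append, List.length_reverse] at *
        simp only [List.length_cons] at hf
        omega
      obtain ⟨r1, r2, r3, r4, r5⟩ := ih (seen ++ news) (news.reverse ++ rest) i1 i2 i3 i4 i5
      rw [hunfold]
      refine ⟨r1, r2, fun z hz => r3 z (List.mem_append.mpr (Or.inl hz)), r4, ?_⟩
      intro P hP hstep a ha
      refine r5 P ?_ hstep a ha
      intro a' ha'
      rcases List.mem_append.mp ha' with h | h
      · exact hP a' h
      · obtain ⟨hb', _, hadj⟩ := hnewsP a' h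
        exact hstep x a' (hP x hxseen) hb' hadj

theorem pvUpdate_append (s l : List (List Int × Int × Int)) (hl : l.Nodup)
    (hd : ∀ z ∈ l, z ∉ s) :
    PySem.Set.update s l = s ++ l := by
  induction l generalizing s with
  | nil => simp [PySem.Set.update]
  | cons z l ih =>
    have hz : z ∉ l := (List.nodup_cons.mp hl).1
    have hadd : PySem.Set.add s z = s ++ [z] := by
      have : z ∉ s := hd z (by simp)
      simp [PySem.Set.add, this]
    have : PySem.Set.update s (z :: l) = PySem.Set.update (PySem.Set.add s z) l := by
      simp [PySem.Set.update]
    rw [this, hadd, ih (s ++ [z]) (List.nodup_cons.mp hl).2 (fun w hw => by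
      have h1 : w ∉ s := hd w (by simp [hw])
      have h2 : w ≠ z := fun h => hz (h ▸ hw)
      simp [List.mem_append, h1, h2])]
    simp

theorem pvIter_fixed (verts : List (List Int × Int × Int)) (comp : List (List Int × Int × Int))
    (h : pvStep verts comp = comp) : ∀ m, pvIter verts m comp = comp := by
  intro m
  induction m with
  | zero => rfl
  | succ n ih => simpa [pvIter, h] using ih

theorem pvIter_spec (verts : List (List Int × Int × Int)) (hv : verts.Nodup) :
    ∀ m comp, comp.Nodup → (∀ z ∈ comp, z ∈ verts) →
    (pvIter verts m comp).Nodup ∧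
    (∀ z ∈ pvIter verts m comp, z ∈ verts) ∧
    (∀ z ∈ comp, z ∈ pvIter verts m comp) ∧
    (∀ P : (List Int × Int × Int) → Prop, (∀ a ∈ comp, P a) →
      (∀ a y, P a → y ∈ verts → pvAdj a y = true → P y) →
      ∀ a ∈ pvIter verts m comp, P a) ∧
    (comp.length + m ≤ (pvIter verts m comp).length ∨ pvClosed verts (pvIter verts m comp)) := by
  intro m
  induction m with
  | zero =>
    intro comp h1 h2
    exact ⟨h1, h2, fun z hz => hz, fun P hP _ a ha => hP a ha, Or.inl (by simp [pvIter])⟩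
  | succ n ih =>
    intro comp h1 h2
    have hstep : pvIter verts (n + 1) comp = pvIter verts n (pvStep verts comp) := rfl
    set fresh := verts.filter (fun y => decide (y ∉ comp) && comp.any (fun x => pvAdj x y))
      with hfr
    have hfP : ∀ z ∈ fresh, z ∈ verts ∧ z ∉ comp := by
      intro z hz
      rw [hfr] at hz
      have h := List.mem_filter.mp hz
      have h2' : z ∉ comp ∧ ∃ x ∈ comp, pvAdj x z = true := by simpa using h.2
      exact ⟨h.1, h2'.1⟩
    have hfn : fresh.Nodup := by rw [hfr]; exact hv.filter _
    have hsteq : pvStep verts comp = comp ++ fresh := by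
      unfold pvStep
      rw [← hfr]
      exact pvUpdate_append comp fresh hfn (fun z hz => (hfP z hz).2)
    by_cases hfe : fresh = []
    · have hcl : pvClosed verts comp := by
        intro x hx y hy hadj
        by_contra hyn
        have hmem : y ∈ fresh := by
          rw [hfr]
          exact List.mem_filter.mpr ⟨hy, by
            simp only [Bool.and_eq_true, decide_eq_true_eq]
            exact ⟨hyn, List.any_eq_true.mpr ⟨x, hx, hadj⟩⟩⟩
        rw [hfe] at hmem
        simp at hmem
      have hfix : pvStep verts comp = comp := by rw [hsteq, hfe, List.append_nil]
      have hiter : pvIter verts (n + 1) comp = comp := pvIter_fixed verts comp hfix (n + 1)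
      rw [hiter]
      exact ⟨h1, h2, fun z hz => hz, fun P hP _ a ha => hP a ha, Or.inr hcl⟩
    · have i1 : (comp ++ fresh).Nodup := by
        rw [List.nodup_append]
        exact ⟨h1, hfn, fun a ha b hbn hab => (hfP b hbn).2 (hab ▸ ha)⟩
      have i2 : ∀ z ∈ comp ++ fresh, z ∈ verts := by
        intro z hz
        rcases List.mem_append.mp hz with h | h
        · exact h2 z h
        · exact (hfP z h).1
      obtain ⟨r1, r2, r3, r4, r5⟩ := ih (comp ++ fresh) i1 i2
      rw [hstep, hsteq]
      refine ⟨r1, r2, fun z hz => r3 z (List.mem_append.mpr (Or.inl hz)), ?_, ?_⟩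
      · intro P hP hstepP a ha
        refine r4 P ?_ hstepP a ha
        intro a' ha'
        rcases List.mem_append.mp ha' with h | h
        · exact hP a' h
        · have hm := List.mem_filter.mp (by rw [hfr] at h; exact h)
          have hc : a' ∉ comp ∧ ∃ x ∈ comp, pvAdj x a' = true := by simpa using hm.2
          obtain ⟨x, hx, hadj⟩ := hc.2
          exact hstepP x a' (hP x hx) hm.1 hadj
      · rcases r5 with h | h
        · left
          have hlf : 1 ≤ fresh.length := by
            cases hfe2 : fresh with
            | nil => exact absurd hfe2 hfe
            | cons _ _ => simp
          have hlen : (comp ++ fresh).length = comp.length + fresh.length :=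
            List.length_append
          omega
        · right
          exact h

theorem pvConnected_eq (bucket : List (List Int × Int × Int)) (hb : bucket.Nodup) :
    pvConnected bucket = pvConnectedAlt bucket := by
  cases bucket with
  | nil => rfl
  | cons v t =>
    obtain ⟨a1, a2, a3, a4, a5⟩ := pvDfs_spec (v :: t) hb ((v :: t).length) [v] [v]
      (by simp) (by simp) (by simp) (by intro z hz hns; simp at hz; subst hz; simp at hns)
      (by simp only [List.length_cons, List.length_nil]; omega)
    obtain ⟨b1, b2, b3, b4, b5⟩ := pvIter_spec (v :: t) hb ((v :: t).length - 1) [v]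
      (by simp) (by simp)
    have hbclosed : pvClosed (v :: t) (pvIter (v :: t) ((v :: t).length - 1) [v]) := by
      rcases b5 with h | h
      · have hle : (pvIter (v :: t) ((v :: t).length - 1) [v]).length ≤ (v :: t).length :=
          (List.subperm_of_subset b1 (fun a ha => b2 a ha)).length_le
        have hsup : (v :: t) ⊆ pvIter (v :: t) ((v :: t).length - 1) [v] := by
          have hsp : List.Subperm (pvIter (v :: t) ((v :: t).length - 1) [v]) (v :: t) :=
            List.subperm_of_subset b1 (fun a ha => b2 a ha)
          have hperm := hsp.perm_of_length_le (by simp at h ⊢; omega)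
          exact fun a ha => hperm.mem_iff.mpr ha
        intro x _ y hy _
        exact hsup hy
      · exact h
    have hAB : ∀ z ∈ pvDfsLoop (v :: t) (v :: t).length [v] [v],
        z ∈ pvIter (v :: t) ((v :: t).length - 1) [v] := by
      refine a5 _ ?_ ?_
      · intro a ha
        simp at ha
        subst ha
        exact b3 _ (by simp)
      · intro a y hPa hy hadj
        exact hbclosed a hPa y hy hadj
    have hBA : ∀ z ∈ pvIter (v :: t) ((v :: t).length - 1) [v],
        z ∈ pvDfsLoop (v :: t) (v :: t).length [v] [v] := by
      refine b4 _ ?_ ?_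
      · intro a ha
        simp at ha
        subst ha
        exact a3 _ (by simp)
      · intro a y hPa hy hadj
        exact a4 a hPa y hy hadj
    have hperm := (List.perm_ext_iff_of_nodup a1 b1).mpr (fun a => ⟨hAB a, hBA a⟩)
    have hlen := hperm.length_eq
    simp only [pvConnected, pvConnectedAlt]
    rw [hlen]

theorem pvFold_eq (root : List Int × Int × Int) :
    ∀ (cs : List (List (List Int × Int × Int))) (out : List (List (List Int × Int × Int))),
      cs.foldl (fun out combo =>
        let bucket := PySem.Set.ofList (root :: combo)
        if pvConnected bucket then out ++ [bucket] else out) out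
      = cs.foldl (fun out combo =>
        let bucket := PySem.Set.ofList (root :: combo)
        if pvConnectedAlt bucket then out ++ [bucket] else out) out := by
  intro cs out
  simp only [pvConnected_eq _ (PySem.Set.nodup_ofList _)]

-- ===== VERDICT (by name: the statement is the Claim_ definition above) =====
theorem anchored_buckets_spec : Claim_equal_anchored_buckets := by
  intro vs root k _ _
  unfold Spec_anchored_buckets anchored_buckets anchored_buckets_alt
  exact pvFold_eq root _ []
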